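-- pv_equiv track=rewrite | github.com/hnc01/online-judge | LeetCode/top_google/hard/tiling_a_rectangle_with_the_fewest_squares.py | findMaxSquare
-- ===== SOURCE A (Python) =====
-- def findMaxSquare(grid, n, m, i, j):
--     # since we fill squares from left to right, top to bottom
--     # it's enough to find the first True to the right and first True from the bottom
--     # to get the max size square that can fit with this cell as top left corner
--
--     maxWidth = 0
--
--     for col in range(j, m):
--         if grid[i][col] == True:
--             # we found our right boundary
--             break
--         else:
--             maxWidth += 1
--
--     maxHeight = 0
--
--     for row in range(i, n):
--         if grid[row][j] == True:
--             # we found our bottom boundary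
--             break
--         else:
--             maxHeight += 1
--
--     # the max size square that we can fit at (i, j) is the min between max height and max width
--     return min(maxWidth, maxHeight)
-- ===== SOURCE B (Python) =====
-- def findMaxSquare(grid, n, m, i, j):
--     # Single scan over the square's growing offset s: stop at the first offset
--     # where the right-edge cell or the bottom-edge cell is blocked, or at the
--     # boundary; that offset equals min(maxWidth, maxHeight).
--     s = 0
--     while j + s < m and i + s < n:
--         if grid[i][j + s] == True or grid[i + s][j] == True:
--             break
--         s += 1
--     return s
-- ===== Notes on version B (the rewrite author's own statement) =====
-- stated objective: simpler
-- what changed: Replaces A's two independent boundary scans (count clear cells rightward, count clear cells downward, then take min) with a single loop over the square offset s that stops at the first offset whose right-edge or bottom-edge cell is blocked or out of bounds.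
import Mathlib
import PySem

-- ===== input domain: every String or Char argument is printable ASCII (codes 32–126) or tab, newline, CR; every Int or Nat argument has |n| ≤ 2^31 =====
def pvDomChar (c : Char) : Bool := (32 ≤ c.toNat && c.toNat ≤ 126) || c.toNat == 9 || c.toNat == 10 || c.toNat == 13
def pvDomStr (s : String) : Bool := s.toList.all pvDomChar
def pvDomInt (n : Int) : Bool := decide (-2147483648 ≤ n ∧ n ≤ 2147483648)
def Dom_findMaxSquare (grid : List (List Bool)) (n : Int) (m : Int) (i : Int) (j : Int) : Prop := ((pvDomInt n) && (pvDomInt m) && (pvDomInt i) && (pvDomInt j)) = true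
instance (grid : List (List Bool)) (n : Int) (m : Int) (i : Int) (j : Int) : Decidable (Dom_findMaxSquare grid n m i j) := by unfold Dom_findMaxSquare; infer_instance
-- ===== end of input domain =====

-- B replaces A's two separate boundary scans with one loop over the square offset: simpler, single pass.


-- ===== PORT A =====
-- shared cell accessor: grid[r][c] (totalized with a default; Pre_ keeps all accesses in range)
def pvCell (grid : List (List Bool)) (r c : Int) : Bool :=
  (PySem.List.pyGet? ((PySem.List.pyGet? grid r).getD []) c).getD false

-- 'for col in range(j, m): if grid[i][col] == True: break else: maxWidth += 1'
def pvWidthLoop (grid : List (List Bool)) (i : Int) (cols : List Int) (acc : Int) : Int :=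
  match cols with
  | [] => acc
  | c :: rest => if pvCell grid i c then acc else pvWidthLoop grid i rest (acc + 1)

-- 'for row in range(i, n): if grid[row][j] == True: break else: maxHeight += 1'
def pvHeightLoop (grid : List (List Bool)) (j : Int) (rows : List Int) (acc : Int) : Int :=
  match rows with
  | [] => acc
  | r :: rest => if pvCell grid r j then acc else pvHeightLoop grid j rest (acc + 1)

def findMaxSquare (grid : List (List Bool)) (n : Int) (m : Int) (i : Int) (j : Int) : Int :=
  min (pvWidthLoop grid i (PySem.List.pyRange j m 1) 0)
      (pvHeightLoop grid j (PySem.List.pyRange i n 1) 0)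

-- ===== PORT B =====
-- the while loop of Source B; fuel bounds the iteration count (the loop runs at most min(m-j, n-i) times)
def pvAltLoop (grid : List (List Bool)) (n m i j s : Int) : Nat → Int
  | 0 => s
  | fuel + 1 =>
      if j + s < m ∧ i + s < n then
        if pvCell grid i (j + s) || pvCell grid (i + s) j then s
        else pvAltLoop grid n m i j (s + 1) fuel
      else s

def findMaxSquare_alt (grid : List (List Bool)) (n : Int) (m : Int) (i : Int) (j : Int) : Int :=
  pvAltLoop grid n m i j 0 (min (m - j) (n - i)).toNat

-- ===== PRECONDITION & SPEC =====
-- Pre-side accessors (kept separate from the ports): grid[r][c] with default, and len(grid[r])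
def pvPreAt (grid : List (List Bool)) (r c : Int) : Bool :=
  (PySem.List.pyGet? ((PySem.List.pyGet? grid r).getD []) c).getD false
def pvPreRowLen (grid : List (List Bool)) (r : Int) : Nat :=
  ((PySem.List.pyGet? grid r).getD []).length

-- Pre_ is exactly the set of inputs on which the Python A returns normally: each loop either does not
-- run, breaks at a True cell, or exhausts its range before any index leaves Python's valid (wrapped) range.
def Pre_findMaxSquare (grid : List (List Bool)) (n : Int) (m : Int) (i : Int) (j : Int) : Prop :=
  (m ≤ j ∨
    (PySem.Raise.InRange grid.length i ∧ -((pvPreRowLen grid i : Int)) ≤ j ∧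
      (m ≤ (pvPreRowLen grid i : Int) ∨
        ∃ col ∈ PySem.List.pyRange j (pvPreRowLen grid i : Int) 1, pvPreAt grid i col = true)))
  ∧
  (n ≤ i ∨
    (-((grid.length : Int)) ≤ i ∧
      ¬ ((∃ row ∈ PySem.List.pyRange i (min n (grid.length : Int)) 1,
            (∀ r ∈ PySem.List.pyRange i row 1,
               PySem.Raise.InRange (pvPreRowLen grid r) j ∧ pvPreAt grid r j ≠ true) ∧
            ¬ PySem.Raise.InRange (pvPreRowLen grid row) j)
         ∨ ((grid.length : Int) < n ∧
            ∀ r ∈ PySem.List.pyRange i (grid.length : Int) 1,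
               PySem.Raise.InRange (pvPreRowLen grid r) j ∧ pvPreAt grid r j ≠ true))))
instance (grid : List (List Bool)) (n : Int) (m : Int) (i : Int) (j : Int) : Decidable (Pre_findMaxSquare grid n m i j) := by unfold Pre_findMaxSquare; infer_instance

def pvWitness_findMaxSquare : List (List Bool) × Int × Int × Int × Int := ([[false]], 1, 1, 0, 0)

def Spec_findMaxSquare (grid : List (List Bool)) (n : Int) (m : Int) (i : Int) (j : Int) (out : Int) : Prop := out = findMaxSquare_alt grid n m i j
instance (grid : List (List Bool)) (n : Int) (m : Int) (i : Int) (j : Int) (out : Int) : Decidable (Spec_findMaxSquare grid n m i j out) := by unfold Spec_findMaxSquare; infer_instance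

-- ===== CLAIM (what is proved, stated in full; the proofs are below) =====
def Claim_equal_findMaxSquare : Prop := ∀ (grid : List (List Bool)) (n : Int) (m : Int) (i : Int) (j : Int), Dom_findMaxSquare grid n m i j → Pre_findMaxSquare grid n m i j → Spec_findMaxSquare grid n m i j (findMaxSquare grid n m i j)

-- ===== LEMMAS AND PROOFS =====

theorem pvWidthLoop_shift (grid : List (List Bool)) (i : Int) (cols : List Int) (acc : Int) :
    pvWidthLoop grid i cols acc = acc + pvWidthLoop grid i cols 0 := by
  induction cols generalizing acc with
  | nil => simp [pvWidthLoop]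
  | cons c rest ih =>
    by_cases h : pvCell grid i c
    · simp [pvWidthLoop, h]
    · simp only [pvWidthLoop, h, Bool.false_eq_true, if_false]
      rw [ih (acc + 1), ih (0 + 1)]
      omega

theorem pvHeightLoop_shift (grid : List (List Bool)) (j : Int) (rows : List Int) (acc : Int) :
    pvHeightLoop grid j rows acc = acc + pvHeightLoop grid j rows 0 := by
  induction rows generalizing acc with
  | nil => simp [pvHeightLoop]
  | cons r rest ih =>
    by_cases h : pvCell grid r j
    · simp [pvHeightLoop, h]
    · simp only [pvHeightLoop, h, Bool.false_eq_true, if_false]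
      rw [ih (acc + 1), ih (0 + 1)]
      omega

theorem pvWidthLoop_nonneg (grid : List (List Bool)) (i : Int) (cols : List Int) :
    0 ≤ pvWidthLoop grid i cols 0 := by
  induction cols with
  | nil => simp [pvWidthLoop]
  | cons c rest ih =>
    by_cases h : pvCell grid i c
    · simp [pvWidthLoop, h]
    · simp only [pvWidthLoop, h, Bool.false_eq_true, if_false]
      rw [pvWidthLoop_shift]
      omega

theorem pvHeightLoop_nonneg (grid : List (List Bool)) (j : Int) (rows : List Int) :
    0 ≤ pvHeightLoop grid j rows 0 := by
  induction rows with
  | nil => simp [pvHeightLoop]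
  | cons r rest ih =>
    by_cases h : pvCell grid r j
    · simp [pvHeightLoop, h]
    · simp only [pvHeightLoop, h, Bool.false_eq_true, if_false]
      rw [pvHeightLoop_shift]
      omega

theorem pv_main (fuel : Nat) : ∀ (grid : List (List Bool)) (n m i j s : Int),
    (min (m - j - s) (n - i - s)).toNat ≤ fuel →
    pvAltLoop grid n m i j s fuel =
      s + min (pvWidthLoop grid i (PySem.List.pyRange (j + s) m 1) 0)
              (pvHeightLoop grid j (PySem.List.pyRange (i + s) n 1) 0) := by
  induction fuel with
  | zero =>
    intro grid n m i j s h
    have hle : m ≤ j + s ∨ n ≤ i + s := by omega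
    rcases hle with hle | hle
    · rw [PySem.List.pyRange_one_eq_nil hle]
      have := pvHeightLoop_nonneg grid j (PySem.List.pyRange (i + s) n 1)
      simp only [pvAltLoop, pvWidthLoop]
      omega
    · rw [PySem.List.pyRange_one_eq_nil hle]
      have := pvWidthLoop_nonneg grid i (PySem.List.pyRange (j + s) m 1)
      simp only [pvAltLoop, pvHeightLoop]
      omega
  | succ fuel ih =>
    intro grid n m i j s h
    simp only [pvAltLoop]
    by_cases hc : j + s < m ∧ i + s < n
    · obtain ⟨hjm, hin⟩ := hc
      rw [if_pos ⟨hjm, hin⟩]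
      rw [PySem.List.pyRange_one_cons hjm, PySem.List.pyRange_one_cons hin]
      simp only [pvWidthLoop, pvHeightLoop]
      by_cases h1 : pvCell grid i (j + s)
      · simp only [h1, Bool.true_or, if_true]
        by_cases h2 : pvCell grid (i + s) j
        · simp [h2]
        · simp only [h2, Bool.false_eq_true, if_false]
          rw [pvHeightLoop_shift]
          have := pvHeightLoop_nonneg grid j (PySem.List.pyRange (i + s + 1) n 1)
          omega
      · by_cases h2 : pvCell grid (i + s) j
        · simp only [h1, h2, Bool.false_or, Bool.false_eq_true, if_false, if_true]
          rw [pvWidthLoop_shift]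
          have := pvWidthLoop_nonneg grid i (PySem.List.pyRange (j + s + 1) m 1)
          omega
        · simp only [h1, h2, Bool.false_or, Bool.false_eq_true, if_false]
          rw [pvWidthLoop_shift, pvHeightLoop_shift]
          rw [ih grid n m i j (s + 1) (by omega)]
          have e1 : j + (s + 1) = j + s + 1 := by omega
          have e2 : i + (s + 1) = i + s + 1 := by omega
          rw [e1, e2]
          have hw := pvWidthLoop_nonneg grid i (PySem.List.pyRange (j + s + 1) m 1)
          have hh := pvHeightLoop_nonneg grid j (PySem.List.pyRange (i + s + 1) n 1)
          omega
    · rw [if_neg hc]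
      have hle : m ≤ j + s ∨ n ≤ i + s := by omega
      rcases hle with hle | hle
      · rw [PySem.List.pyRange_one_eq_nil hle]
        have := pvHeightLoop_nonneg grid j (PySem.List.pyRange (i + s) n 1)
        simp only [pvWidthLoop]
        omega
      · rw [PySem.List.pyRange_one_eq_nil hle]
        have := pvWidthLoop_nonneg grid i (PySem.List.pyRange (j + s) m 1)
        simp only [pvHeightLoop]
        omega

-- ===== VERDICT (by name: the statement is the Claim_ definition above) =====
theorem findMaxSquare_spec : Claim_equal_findMaxSquare := by
  intro grid n m i j _ _
  unfold Spec_findMaxSquare findMaxSquare findMaxSquare_alt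
  rw [pv_main ((min (m - j) (n - i)).toNat) grid n m i j 0 (by omega)]
  simp
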